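-- pv_equiv track=rewrite | github.com/chosaihim/jungle_codingTest_study | FEB/2nd/태양_풍선터뜨리기.py | solution
-- ===== SOURCE A (Python) =====
-- import heapq
--
-- def solution(a):
--     answer = 0
--     # logic
--     # upper group (a[0]~ a[idx])
--     # target value (a[idx])
--     # lower group (a[idx] ~ a[n-1])
--     #! target value가 upper group의 최솟값과 lower group의 최솟값보다 작으면 불가능 하다.
--     #? if( target < min(lowergroup) , target < min(uppergroup) ) return impossible;
--     #! group을 나타내는 방법으로 heap 자료구조를 사용한다.
--
--     q = []
--     upper_check = [False] * len(a)
--     lower_check = [False] * len(a)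
--     upper_check[0] = True #@ 앞에 어떤 수도 올수 없는 첫번째 인덱스는 상관없지
--     upper_check[len(a) - 1] = True
--     lower_check[len(a) - 1] = True
--     heapq.heappush(q, a[0])
--
--     for i in range(1, len(a) - 1) :
--         if q[0] > a[i] : #@ uppergroup 의 최솟값이 target value보다 큰가?
--             upper_check[i] = True
--         heapq.heappush(q, a[i])
--     q = []
--     heapq.heappush(q, a[len(a) - 1])
--     for i in range(len(a) - 1, 0, -1) :
--         if q[0] > a[i] :
--             lower_check[i] = True
--         heapq.heappush(q, a[i])
--     for i in range(len(a)) :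
--         if upper_check[i] or lower_check[i] :
--             answer += 1
--     return answer
-- ===== SOURCE B (Python) =====
-- def solution(a):
--     # Inclusion-exclusion over "record" elements: an index pops iff it is a strict
--     # running-minimum record from the left or from the right; |L|+|R|-|L∩R|, where
--     # L∩R is nonempty (a single index) exactly when the minimum value occurs once.
--     def records(xs):
--         cnt = 0
--         cur = None
--         for x in xs:
--             if cur is None or x < cur:
--                 cnt += 1
--                 cur = x
--         return cnt
--     extra = 1 if a.count(min(a)) == 1 else 0
--     return records(a) + records(reversed(a)) - extra
-- ===== Notes on version B (the rewrite author's own statement) =====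
-- stated objective: faster
-- what changed: Replaces A's per-index heap-driven boolean arrays (two heaps, one heappush per element, then a counting pass over the union of two flag arrays) by inclusion-exclusion over strict running-minimum records: one helper counts records of the list and of its reversal, and the overlap is 1 exactly when the minimum value occurs once, so the answer is records(a) + records(reversed(a)) - (min unique ? 1 : 0).
-- outside the precondition, e.g. on solution([]): A raises IndexError, B raises ValueError
import Mathlib
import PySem

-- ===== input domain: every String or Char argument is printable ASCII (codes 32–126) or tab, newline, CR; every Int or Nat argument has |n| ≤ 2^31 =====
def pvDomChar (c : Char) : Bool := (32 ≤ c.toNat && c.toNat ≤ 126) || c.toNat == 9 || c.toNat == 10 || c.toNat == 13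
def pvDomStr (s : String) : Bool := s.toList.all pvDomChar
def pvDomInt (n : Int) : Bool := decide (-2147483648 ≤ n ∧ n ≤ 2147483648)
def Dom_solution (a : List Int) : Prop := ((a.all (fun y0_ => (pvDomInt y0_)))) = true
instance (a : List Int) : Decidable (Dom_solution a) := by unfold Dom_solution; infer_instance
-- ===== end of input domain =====

-- B counts strict running-minimum records of the list and of its reversal and combines them by
-- inclusion-exclusion (the overlap is 1 exactly when the minimum value occurs once), instead of
-- A's two heaps filling per-index boolean arrays whose union is then counted.

-- ===== PORT A =====
-- heapq.heappush, modelled for the only observation A makes of the heap (its first element, the minimum):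
-- the list is kept in ascending order, so its head is exactly what Python's heap stores first.
def heappushA : List Int → Int → List Int
  | [], x => [x]
  | y :: ys, x => if x ≤ y then x :: y :: ys else y :: heappushA ys x

-- All list indices are in range under Pre_ (a nonempty), and q is never empty when its head is read,
-- so pyGetD/headD defaults are never observed.
def solution (a : List Int) : Int :=
  let n := a.length
  let upper := ((List.replicate n false).set 0 true).set (n - 1) true
  let lower := (List.replicate n false).set (n - 1) true
  let q := heappushA [] (PySem.List.pyGetD a 0 0)
  let s1 := (PySem.List.pyRange 1 ((n : Int) - 1) 1).foldl
    (fun st i =>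
      let ai := PySem.List.pyGetD a i 0
      (heappushA st.1 ai, if st.1.headD 0 > ai then st.2.set i.toNat true else st.2))
    (q, upper)
  let upper := s1.2
  let q2 := heappushA [] (PySem.List.pyGetD a ((n : Int) - 1) 0)
  let s2 := (PySem.List.pyRange ((n : Int) - 1) 0 (-1)).foldl
    (fun st i =>
      let ai := PySem.List.pyGetD a i 0
      (heappushA st.1 ai, if st.1.headD 0 > ai then st.2.set i.toNat true else st.2))
    (q2, lower)
  let lower := s2.2
  (PySem.List.pyRange 0 (n : Int) 1).foldl
    (fun acc i => if (upper.getD i.toNat false || lower.getD i.toNat false) = true then acc + 1 else acc) 0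

-- ===== PORT B =====
-- the body of B's 'records' loop: count strict running-minimum records
def stepB (st : Int × Option Int) (x : Int) : Int × Option Int :=
  match st.2 with
  | none => (st.1 + 1, some x)
  | some m => if x < m then (st.1 + 1, some x) else st

def recordsB (xs : List Int) : Int := (xs.foldl stepB ((0 : Int), (none : Option Int))).1

def solution_alt (a : List Int) : Int :=
  let extra : Int :=
    match PySem.List.min? a (fun x => x) with
    | some m => if PySem.List.count a m = 1 then 1 else 0
    | none => 0   -- unreachable under Pre_ (min([]) raises in Python)
  recordsB a + recordsB a.reverse - extra

-- ===== PRECONDITION & SPEC =====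
-- Pre_ excludes only the empty list, on which A raises IndexError (and B's min([]) raises ValueError).
def Pre_solution (a : List Int) : Prop := a ≠ []
instance (a : List Int) : Decidable (Pre_solution a) := by unfold Pre_solution; infer_instance
def pvWitness_solution : List Int := [3, 1, 2]

def Spec_solution (a : List Int) (out : Int) : Prop := out = solution_alt a
instance (a : List Int) (out : Int) : Decidable (Spec_solution a out) := by unfold Spec_solution; infer_instance

-- ===== CLAIM (what is proved, stated in full; the proofs are below) =====
def Claim_equal_solution : Prop := ∀ (a : List Int), Dom_solution a → Pre_solution a → Spec_solution a (solution a)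

-- ===== LEMMAS AND PROOFS =====

-- pmin a (k+1) = minimum of the first k+1 elements; pmin a 0 = first element (seed value).
def pmin (a : List Int) : Nat → Int
  | 0 => a.headD 0
  | k + 1 => min (pmin a k) (a.getD k 0)

-- sminG a g = min of the last g elements of a (g ≥ 1); sminG a 0 = last element (seed value).
def sminG (a : List Int) : Nat → Int
  | 0 => a.getD (a.length - 1) 0
  | g + 1 => min (a.getD (a.length - 1 - g) 0) (sminG a g)

-- j is a strict left-to-right running-minimum record
def Lb (a : List Int) (j : Nat) : Bool :=
  decide (j = 0) || decide (pmin a j > a.getD j 0)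
-- j is a strict right-to-left running-minimum record
def Rb (a : List Int) (j : Nat) : Bool :=
  decide (j = a.length - 1) || decide (sminG a (a.length - 1 - j) > a.getD j 0)

lemma pyRange_up (b : Int) :
    PySem.List.pyRange 1 b 1 = (List.range (b - 1).toNat).map (fun (t : Nat) => 1 + (t : Int)) := by
  simp only [PySem.List.pyRange]
  rw [if_neg (by norm_num), if_pos (by norm_num)]
  rcases lt_or_ge 1 b with h | h
  · rw [if_pos h]
    have h1 : (b - 1 + 1 - 1) / 1 = b - 1 := by omega
    rw [h1]
    simp
  · rw [if_neg (by omega)]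
    have h0 : (b - 1).toNat = 0 := by omega
    simp [h0]

lemma pyRange_down (b e : Int) :
    PySem.List.pyRange b e (-1) = (List.range (b - e).toNat).map (fun (k : Nat) => b - (k : Int)) := by
  simp only [PySem.List.pyRange]
  rw [if_neg (by norm_num), if_neg (by norm_num)]
  rcases lt_or_ge e b with h | h
  · rw [if_pos h]
    have h1 : (b - e + - -1 - 1) / - -1 = b - e := by norm_num
    rw [h1]
    apply List.map_congr_left; intro x _; ring
  · rw [if_neg (by omega)]
    have h0 : (b - e).toNat = 0 := by omega
    simp [h0]

lemma heappushA_ne_nil (q : List Int) (x : Int) : heappushA q x ≠ [] := by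
  cases q with
  | nil => simp [heappushA]
  | cons y ys => simp only [heappushA]; split_ifs <;> simp

lemma headD_heappushA (q : List Int) (x d : Int) (hq : q ≠ []) :
    (heappushA q x).headD d = min x (q.headD d) := by
  cases q with
  | nil => exact absurd rfl hq
  | cons y ys =>
      simp only [heappushA]
      split_ifs with h <;> simp [min_def, h]

lemma getD_set_bool (l : List Bool) (p j : Nat) (hp : p < l.length) :
    (l.set p true).getD j false = if p = j then true else l.getD j false := by
  rcases eq_or_ne p j with rfl | h
  · simp [List.getD_eq_getElem?_getD, hp]
  · simp [List.getD_eq_getElem?_getD, List.getElem?_set_ne h, h]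

-- A's first loop, after m steps (processing i = 1..m)
lemma loopA1 (a : List Int) (m : Nat) (hm : m + 2 ≤ a.length) :
    ∃ Q U,
      ((List.range m).map (fun (t : Nat) => 1 + (t : Int))).foldl
        (fun st i =>
          let ai := PySem.List.pyGetD a i 0
          (heappushA st.1 ai, if st.1.headD 0 > ai then st.2.set i.toNat true else st.2))
        (heappushA [] (PySem.List.pyGetD a 0 0),
         ((List.replicate a.length false).set 0 true).set (a.length - 1) true) = (Q, U)
      ∧ Q ≠ [] ∧ Q.headD 0 = pmin a (m + 1)
      ∧ U.length = a.length
      ∧ ∀ j, j < a.length →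
          U.getD j false = (decide (j = 0) || decide (j = a.length - 1)
            || (decide (1 ≤ j) && decide (j ≤ m) && decide (pmin a j > a.getD j 0))) := by
  induction m with
  | zero =>
      refine ⟨_, _, rfl, ?_, ?_, ?_, ?_⟩
      · simp [heappushA]
      · have h0 : a.headD 0 = a.getD 0 0 := by cases a <;> simp
        have h1 : pmin a 1 = a.getD 0 0 := by cases a <;> simp [pmin]
        rw [h1]
        simp [heappushA, PySem.List.pyGetD_of_nonneg a (0:Int) le_rfl]
      · simp
      · intro j hj
        have hlt : a.length - 1 < ((List.replicate a.length false).set 0 true).length := by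
          simp; omega
        rw [getD_set_bool _ _ _ hlt, getD_set_bool _ _ _ (by simp; omega)]
        by_cases h1 : j = 0 <;> by_cases h2 : j = a.length - 1 <;>
          simp [h1, h2, (by omega : ¬ (1 ≤ (0:Nat)))] <;> omega
  | succ m ih =>
      obtain ⟨Q, U, heq, hne, hhead, hlen, hchar⟩ := ih (by omega)
      rw [List.range_succ, List.map_append, List.foldl_append, heq]
      have hcast : (1 + (m : Int)) = ((m + 1 : Nat) : Int) := by push_cast; ring
      have hai : PySem.List.pyGetD a (1 + (m : Int)) 0 = a.getD (m + 1) 0 := by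
        rw [hcast, PySem.List.pyGetD_natCast]
      have htn : (1 + (m : Int)).toNat = m + 1 := by omega
      refine ⟨_, _, rfl, ?_, ?_, ?_, ?_⟩
      · exact heappushA_ne_nil _ _
      · simp only [hai, headD_heappushA _ _ _ hne, hhead, pmin]
        exact min_comm _ _
      · simp only [hai]
        split_ifs <;> simp [hlen]
      · intro j hj
        simp only [hai, htn, hhead]
        have hm1 : m + 1 < U.length := by omega
        split_ifs with ht
        · rw [getD_set_bool _ _ _ hm1]
          by_cases hjm : j = m + 1
          · subst hjm
            simp [ht.le, (by omega : 1 ≤ m + 1), ht]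
            right
            exact ht
          · rw [if_neg (Ne.symm hjm), hchar j hj]
            rw [show decide (j ≤ m) = decide (j ≤ m + 1) from decide_eq_decide.mpr (by omega)]
        · rw [hchar j hj]
          by_cases hjm : j = m + 1
          · subst hjm
            have hne0 : ¬ (m + 1 = 0) := by omega
            have hnel : ¬ (m + 1 = a.length - 1) := by omega
            have hnem : ¬ (m + 1 ≤ m) := by omega
            simp [hne0, hnel, hnem, ht]
            exact not_lt.mp ht
          · rw [show decide (j ≤ m) = decide (j ≤ m + 1) from decide_eq_decide.mpr (by omega)]

-- A's second loop, after m steps (processing i = n-1 .. n-m)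
lemma loopA2 (a : List Int) (m : Nat) (hn : 2 ≤ a.length) (hm : m ≤ a.length - 1) :
    ∃ Q L,
      ((List.range m).map (fun (k : Nat) => ((a.length : Int) - 1) - (k : Int))).foldl
        (fun st i =>
          let ai := PySem.List.pyGetD a i 0
          (heappushA st.1 ai, if st.1.headD 0 > ai then st.2.set i.toNat true else st.2))
        (heappushA [] (PySem.List.pyGetD a ((a.length : Int) - 1) 0),
         (List.replicate a.length false).set (a.length - 1) true) = (Q, L)
      ∧ Q ≠ [] ∧ Q.headD 0 = sminG a m
      ∧ L.length = a.length
      ∧ ∀ j, j < a.length →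
          L.getD j false = (decide (j = a.length - 1)
            || (decide (a.length - m ≤ j) && decide (j + 2 ≤ a.length)
                && decide (sminG a (a.length - 1 - j) > a.getD j 0))) := by
  induction m with
  | zero =>
      have hlast : PySem.List.pyGetD a ((a.length : Int) - 1) 0 = a.getD (a.length - 1) 0 := by
        rw [PySem.List.pyGetD_of_nonneg a _ (by omega)]
        congr 1
        omega
      refine ⟨_, _, rfl, ?_, ?_, ?_, ?_⟩
      · simp [heappushA]
      · simp [heappushA, hlast, sminG]
      · simp
      · intro j hj
        rw [getD_set_bool _ _ _ (by simp; omega)]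
        by_cases h2 : j = a.length - 1
        · rw [if_pos (by omega)]
          simp [h2]
        · rw [if_neg (by omega)]
          have hrep : (List.replicate a.length false).getD j false = false := by simp
          rw [hrep, ← Bool.coe_iff_coe]
          simp only [Bool.or_eq_true, Bool.and_eq_true, decide_eq_true_eq,
            Bool.false_eq_true, false_iff]
          intro h
          rcases h with h | ⟨⟨h3, _⟩, _⟩
          · exact h2 h
          · omega
  | succ m ih =>
      obtain ⟨Q, L, heq, hne, hhead, hlen, hchar⟩ := ih (by omega)
      rw [List.range_succ, List.map_append, List.foldl_append, heq]
      have hai : PySem.List.pyGetD a ((a.length : Int) - 1 - (m : Int)) 0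
          = a.getD (a.length - 1 - m) 0 := by
        rw [PySem.List.pyGetD_of_nonneg a _ (by omega)]
        congr 1
        omega
      have htn : ((a.length : Int) - 1 - (m : Int)).toNat = a.length - 1 - m := by omega
      have e1 : a.length - 1 - (a.length - 1 - m) = m := by omega
      refine ⟨_, _, rfl, ?_, ?_, ?_, ?_⟩
      · exact heappushA_ne_nil _ _
      · simp only [hai, headD_heappushA _ _ _ hne, hhead]
        simp [sminG]
      · simp only [hai]
        split_ifs <;> simp [hlen]
      · intro j hj
        simp only [hai, htn, hhead]
        have hp : a.length - 1 - m < L.length := by omega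
        split_ifs with ht
        · rw [getD_set_bool _ _ _ hp, hchar j hj]
          by_cases hjm : a.length - 1 - m = j
          · subst hjm
            rw [if_pos rfl, e1]
            symm
            simp only [Bool.or_eq_true, Bool.and_eq_true, decide_eq_true_eq]
            by_cases hm0 : m = 0
            · left
              omega
            · right
              exact ⟨⟨by omega, by omega⟩, ht⟩
          · rw [if_neg hjm]
            rw [← Bool.coe_iff_coe]
            simp only [Bool.or_eq_true, Bool.and_eq_true, decide_eq_true_eq]
            omega
        · rw [hchar j hj]
          by_cases hjm : a.length - 1 - m = j
          · subst hjm
            rw [e1]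
            rw [← Bool.coe_iff_coe]
            simp only [Bool.or_eq_true, Bool.and_eq_true, decide_eq_true_eq]
            omega
          · rw [← Bool.coe_iff_coe]
            simp only [Bool.or_eq_true, Bool.and_eq_true, decide_eq_true_eq]
            omega

-- A's value as a count of the union of left and right records
lemma solutionA_count (a : List Int) (hn : 2 ≤ a.length) :
    solution a = ((List.range a.length).countP (fun j => Lb a j || Rb a j) : Int) := by
  obtain ⟨Q1, U, hequ, _, _, hlenU, hcharU⟩ := loopA1 a (a.length - 2) (by omega)
  obtain ⟨Q2, L, heql, _, _, hlenL, hcharL⟩ := loopA2 a (a.length - 1) hn le_rfl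
  simp only [solution]
  rw [pyRange_up, pyRange_down]
  have e1 : (((a.length : Nat) : Int) - 1 - 1).toNat = a.length - 2 := by omega
  have e2 : (((a.length : Nat) : Int) - 1 - 0).toNat = a.length - 1 := by omega
  rw [e1, e2, hequ, heql]
  simp only
  rw [PySem.List.pyRange_zero_natCast, List.foldl_map]
  refine Eq.trans (PySem.List.foldl_congr_mem _ _
    (fun (x : Int) (j : Nat) => if (U.getD j false || L.getD j false) = true then x + 1 else x)
    _ (fun acc x _ => rfl)) ?_
  rw [PySem.List.foldl_if_add_one]
  have hcount : (List.range a.length).countP (fun j => U.getD j false || L.getD j false)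
      = (List.range a.length).countP (fun j => Lb a j || Rb a j) := by
    refine List.countP_congr ?_
    intro j hjmem
    have hj : j < a.length := List.mem_range.mp hjmem
    rw [hcharU j hj, hcharL j hj]
    unfold Lb Rb
    rw [← Bool.coe_iff_coe]
    simp only [Bool.or_eq_true, Bool.and_eq_true, decide_eq_true_eq, iff_true]
    omega
  rw [hcount]
  ring

lemma solution_one (x : Int) : solution [x] = 1 := by
  simp only [solution]
  rw [pyRange_up, pyRange_down, PySem.List.pyRange_zero_natCast]
  norm_num

-- running minimum seeded with m, over the first j elements of xs
def pminF (m : Int) (xs : List Int) (j : Nat) : Int := (xs.take j).foldl min m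

-- B's records loop, fully characterised once the first element has been consumed
lemma recFold (xs : List Int) : ∀ (c : Int) (m : Int),
    xs.foldl stepB (c, some m)
      = (c + ((List.range xs.length).countP (fun j => decide (pminF m xs j > xs.getD j 0)) : Int),
         some (xs.foldl min m)) := by
  induction xs with
  | nil => intro c m; simp [pminF]
  | cons x t ih =>
      intro c m
      have hstep : stepB (c, some m) x
          = (c + (if x < m then 1 else 0), some (min m x)) := by
        simp only [stepB]
        split_ifs with h <;> simp [min_def] <;> omega
      rw [List.foldl_cons, hstep, ih]
      have hcnt : ((List.range (x :: t).length).countP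
            (fun j => decide (pminF m (x :: t) j > (x :: t).getD j 0)) : Int)
          = (if x < m then 1 else 0)
            + ((List.range t.length).countP (fun j => decide (pminF (min m x) t j > t.getD j 0)) : Int) := by
        rw [List.length_cons, List.range_succ_eq_map, List.countP_cons, List.countP_map]
        have h0 : pminF m (x :: t) 0 = m := by simp [pminF]
        have hs : ∀ j : Nat, pminF m (x :: t) (j + 1) = pminF (min m x) t j := by
          intro j
          simp [pminF, List.take_succ_cons]
        have hc : List.countP ((fun j => decide (pminF m (x :: t) j > (x :: t).getD j 0)) ∘ Nat.succ)
              (List.range t.length)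
            = List.countP (fun j => decide (pminF (min m x) t j > t.getD j 0)) (List.range t.length) := by
          refine List.countP_congr ?_
          intro j _
          simp [Function.comp, hs j]
        rw [hc, h0]
        simp only [List.getD_cons_zero, decide_eq_true_eq, gt_iff_lt]
        split_ifs with h <;> push_cast <;> ring
      rw [hcnt]
      rw [Prod.mk.injEq]
      refine ⟨by push_cast; ring, by simp⟩

-- the seeded running minimum is the prefix minimum of the whole list
lemma pminF_eq_pmin (h : Int) (t : List Int) : ∀ j, j ≤ t.length →
    pminF h t j = pmin (h :: t) (j + 1) := by
  intro j
  induction j with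
  | zero => intro _; simp [pminF, pmin]
  | succ j ih =>
      intro hj
      have hjlt : j < t.length := by omega
      have htake : t.take (j + 1) = t.take j ++ [t[j]] := by
        rw [List.take_succ, List.getElem?_eq_getElem hjlt]
        rfl
      have hgd : (h :: t).getD (j + 1) 0 = t.getD j 0 := by simp
      show pminF h t (j + 1) = min (pmin (h :: t) (j + 1)) ((h :: t).getD (j + 1) 0)
      rw [← ih (by omega), hgd, pminF, pminF, htake, List.foldl_append]
      simp [List.getD_eq_getElem?_getD, List.getElem?_eq_getElem hjlt]

-- records = number of left records
lemma records_count (a : List Int) (h : a ≠ []) :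
    recordsB a = ((List.range a.length).countP (Lb a) : Int) := by
  obtain ⟨x, t, rfl⟩ := List.exists_cons_of_ne_nil h
  have hfirst : stepB ((0 : Int), (none : Option Int)) x = (1, some x) := by
    simp [stepB]
  unfold recordsB
  rw [List.foldl_cons, hfirst, recFold]
  simp only [List.length_cons, List.range_succ_eq_map, List.countP_cons, List.countP_map]
  have h0 : Lb (x :: t) 0 = true := by simp [Lb]
  have hc : List.countP (Lb (x :: t) ∘ Nat.succ) (List.range t.length)
      = List.countP (fun j => decide (pminF x t j > t.getD j 0)) (List.range t.length) := by
    refine List.countP_congr ?_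
    intro j hjmem
    have hj : j < t.length := List.mem_range.mp hjmem
    simp only [Function.comp, Lb]
    rw [pminF_eq_pmin x t j (by omega)]
    simp
  rw [hc, h0]
  simp only [if_true]
  push_cast
  ring

-- prefix minima of the reversal are suffix minima of the list
lemma pmin_reverse (a : List Int) (h : a ≠ []) : ∀ j, j ≤ a.length →
    pmin a.reverse j = sminG a j := by
  intro j
  induction j with
  | zero =>
      intro _
      have hn : 0 < a.length := List.length_pos_iff.mpr h
      show a.reverse.headD 0 = a.getD (a.length - 1) 0
      have : a.reverse.headD 0 = a.reverse.getD 0 0 := by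
        cases hr : a.reverse with
        | nil => simp
        | cons y ys => simp
      rw [this, List.getD_eq_getElem?_getD, List.getElem?_eq_getElem (by simp; omega),
        List.getElem_reverse, List.getD_eq_getElem?_getD, List.getElem?_eq_getElem (by omega)]
      simp
  | succ j ih =>
      intro hj
      have hjlt : j < a.length := by omega
      have hgd : a.reverse.getD j 0 = a.getD (a.length - 1 - j) 0 := by
        rw [List.getD_eq_getElem?_getD, List.getElem?_eq_getElem (by simp; omega),
          List.getElem_reverse, List.getD_eq_getElem?_getD,
          List.getElem?_eq_getElem (by omega)]
      show min (pmin a.reverse j) (a.reverse.getD j 0) = sminG a (j + 1)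
      rw [ih (by omega), hgd]
      show _ = min (a.getD (a.length - 1 - j) 0) (sminG a j)
      exact min_comm _ _

-- left records of the reversal are right records of the list
lemma Lb_reverse (a : List Int) (h : a ≠ []) (j : Nat) (hj : j < a.length) :
    Lb a.reverse j = Rb a (a.length - 1 - j) := by
  have hn : 0 < a.length := List.length_pos_iff.mpr h
  unfold Lb Rb
  by_cases h0 : j = 0
  · subst h0
    simp [(by omega : a.length - 1 - 0 = a.length - 1)]
  · have hgd : a.reverse.getD j 0 = a.getD (a.length - 1 - j) 0 := by
      rw [List.getD_eq_getElem?_getD, List.getElem?_eq_getElem (by simp; omega),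
        List.getElem_reverse, List.getD_eq_getElem?_getD,
        List.getElem?_eq_getElem (by omega)]
    rw [pmin_reverse a h j (by omega), hgd,
      (by omega : a.length - 1 - (a.length - 1 - j) = j)]
    have hne1 : ¬ (j = 0) := h0
    have hne2 : ¬ (a.length - 1 - j = a.length - 1) := by omega
    simp [hne1, hne2]

-- reflecting the index range does not change a count
lemma countP_range_reflect (n : Nat) (f : Nat → Bool) :
    (List.range n).countP f = (List.range n).countP (fun j => f (n - 1 - j)) := by
  have hmap : (List.range n).map (fun j => n - 1 - j) = (List.range n).reverse := by
    rw [List.range_eq_range', List.reverse_range']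
    simp
    rw [List.range_eq_range']
  calc (List.range n).countP f
      = ((List.range n).reverse).countP f := ((List.range n).reverse_perm.countP_eq f).symm
    _ = ((List.range n).map (fun j => n - 1 - j)).countP f := by rw [hmap]
    _ = (List.range n).countP (fun j => f (n - 1 - j)) := by
        rw [List.countP_map]; rfl

lemma records_reverse_count (a : List Int) (h : a ≠ []) :
    recordsB a.reverse = ((List.range a.length).countP (Rb a) : Int) := by
  have hrev : a.reverse ≠ [] := by simpa using h
  rw [records_count a.reverse hrev, List.length_reverse]
  congr 1
  have hc : (List.range a.length).countP (Lb a.reverse)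
      = (List.range a.length).countP (fun j => Rb a (a.length - 1 - j)) := by
    refine List.countP_congr ?_
    intro j hjmem
    rw [Lb_reverse a h j (List.mem_range.mp hjmem)]
  rw [hc, ← countP_range_reflect]

-- inclusion-exclusion for countP
lemma countP_or_and (l : List Nat) (f g : Nat → Bool) :
    l.countP (fun x => f x || g x) + l.countP (fun x => f x && g x)
      = l.countP f + l.countP g := by
  induction l with
  | nil => simp
  | cons x t ih =>
      simp only [List.countP_cons]
      cases hf : f x <;> cases hg : g x <;> simp [hf, hg] <;> omega

-- prefix-minimum comparison, elementwise
lemma pmin_gt_iff (a : List Int) (x : Int) : ∀ j, 1 ≤ j → j ≤ a.length →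
    (pmin a j > x ↔ ∀ k, k < j → a.getD k 0 > x) := by
  intro j
  induction j with
  | zero => intro h; omega
  | succ j ih =>
      intro _ hj
      by_cases hj0 : j = 0
      · subst hj0
        have hne : a ≠ [] := by intro he; rw [he] at hj; simp at hj
        have h1 : pmin a 1 = a.getD 0 0 := by
          obtain ⟨y, t, rfl⟩ := List.exists_cons_of_ne_nil hne
          simp [pmin]
        rw [h1]
        constructor
        · intro h k hk
          have : k = 0 := by omega
          rw [this]; exact h
        · intro h; exact h 0 (by omega)
      · have hstep : pmin a (j + 1) = min (pmin a j) (a.getD j 0) := rfl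
        rw [hstep]
        rw [gt_iff_lt, lt_min_iff]
        rw [← gt_iff_lt, ← gt_iff_lt]
        rw [ih (by omega) (by omega)]
        constructor
        · rintro ⟨h1, h2⟩ k hk
          rcases Nat.lt_or_ge k j with hkj | hkj
          · exact h1 k hkj
          · have : k = j := by omega
            rw [this]; exact h2
        · intro h
          exact ⟨fun k hk => h k (by omega), h j (by omega)⟩

-- suffix-minimum comparison, elementwise
lemma sminG_gt_iff (a : List Int) (x : Int) : ∀ g, 1 ≤ g → g ≤ a.length - 1 →
    (sminG a g > x ↔ ∀ k, a.length - g ≤ k → k < a.length → a.getD k 0 > x) := by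
  intro g
  induction g with
  | zero => intro h; omega
  | succ g ih =>
      intro _ hg
      by_cases hg0 : g = 0
      · subst hg0
        have h1 : sminG a 1 = a.getD (a.length - 1) 0 := by
          show min (a.getD (a.length - 1 - 0) 0) (a.getD (a.length - 1) 0) = _
          simp
        rw [h1]
        constructor
        · intro h k hk1 hk2
          have : k = a.length - 1 := by omega
          rw [this]; exact h
        · intro h; exact h (a.length - 1) (by omega) (by omega)
      · have hstep : sminG a (g + 1) = min (a.getD (a.length - 1 - g) 0) (sminG a g) := rfl
        rw [hstep, gt_iff_lt, lt_min_iff, ← gt_iff_lt, ← gt_iff_lt,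
          ih (by omega) (by omega)]
        constructor
        · rintro ⟨h1, h2⟩ k hk1 hk2
          rcases Nat.lt_or_ge k (a.length - g) with hkg | hkg
          · have : k = a.length - 1 - g := by omega
            rw [this]; exact h1
          · exact h2 k hkg hk2
        · intro h
          exact ⟨h (a.length - 1 - g) (by omega) (by omega),
            fun k hk1 hk2 => h k (by omega) hk2⟩

-- an index is both a left and a right record iff it is strictly below every other element
lemma both_iff (a : List Int) (j : Nat) (hj : j < a.length) :
    ((Lb a j && Rb a j) = true) ↔ ∀ k, k < a.length → k ≠ j → a.getD k 0 > a.getD j 0 := by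
  unfold Lb Rb
  rw [Bool.and_eq_true, Bool.or_eq_true, Bool.or_eq_true]
  simp only [decide_eq_true_eq]
  constructor
  · rintro ⟨hL, hR⟩ k hk hkj
    rcases Nat.lt_or_ge k j with hlt | hge
    · rcases hL with h0 | hp
      · omega
      · exact ((pmin_gt_iff a (a.getD j 0) j (by omega) (by omega)).mp hp) k hlt
    · have hgt : j < k := by omega
      rcases hR with h0 | hs
      · omega
      · have hjne : j ≠ a.length - 1 := by omega
        exact ((sminG_gt_iff a (a.getD j 0) (a.length - 1 - j) (by omega) (by omega)).mp hs)
          k (by omega) hk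
  · intro h
    constructor
    · by_cases h0 : j = 0
      · exact Or.inl h0
      · refine Or.inr ((pmin_gt_iff a (a.getD j 0) j (by omega) (by omega)).mpr ?_)
        intro k hk
        exact h k (by omega) (by omega)
    · by_cases h0 : j = a.length - 1
      · exact Or.inl h0
      · refine Or.inr ((sminG_gt_iff a (a.getD j 0) (a.length - 1 - j) (by omega) (by omega)).mpr ?_)
        intro k hk1 hk2
        exact h k hk2 (by omega)

lemma countP_range_single (n j0 : Nat) : ∀ (hj : j0 < n),
    (List.range n).countP (fun j => decide (j = j0)) = 1 := by
  induction n with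
  | zero => intro h; omega
  | succ n ih =>
      intro hj
      rw [List.range_succ, List.countP_append]
      by_cases h : j0 = n
      · subst h
        have h0 : (List.range j0).countP (fun j => decide (j = j0)) = 0 := by
          refine List.countP_eq_zero.mpr ?_
          intro k hk
          simp only [decide_eq_true_eq]
          exact Nat.ne_of_lt (List.mem_range.mp hk)
        simp [h0]
      · have h1 : ([n].countP (fun j => decide (j = j0))) = 0 := by
          simp [Ne.symm, fun h' => h (h' : n = j0).symm]
          omega
        rw [ih (by omega), h1]

-- the overlap term equals B's uniqueness-of-minimum correction
lemma extra_eq (a : List Int) (h : a ≠ []) :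
    (match PySem.List.min? a (fun x => x) with
     | some m => if PySem.List.count a m = 1 then (1 : Int) else 0
     | none => 0)
    = ((List.range a.length).countP (fun j => Lb a j && Rb a j) : Int) := by
  obtain ⟨x, t, rfl⟩ := List.exists_cons_of_ne_nil h
  set a := x :: t with ha
  have hmin : PySem.List.min? a (fun x => x) = some (t.foldl min x) := by
    rw [ha]; exact PySem.List.min?_id_cons x t
  set m := t.foldl min x with hm
  rw [hmin]
  show (if PySem.List.count a (t.foldl min x) = 1 then (1 : Int) else 0) = _
  have hmem : m ∈ a := PySem.List.min?_mem hmin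
  have hisMin : ∀ y ∈ a, m ≤ y := PySem.List.min?_isMin hmin
  have hcnt : PySem.List.count a m = a.count m := PySem.List.count_eq a m
  have hfilter : a.count m = ((List.range a.length).filter (fun k => decide (a.getD k 0 = m))).length := by
    rw [← List.countP_eq_length_filter]
    clear hmem hisMin hcnt hmin ha
    induction a with
    | nil => simp
    | cons y s ih =>
        rw [List.count_cons, List.length_cons, List.range_succ_eq_map, List.countP_cons,
          List.countP_map]
        have hc : List.countP ((fun k => decide ((y :: s).getD k 0 = m)) ∘ Nat.succ) (List.range s.length)
            = List.countP (fun k => decide (s.getD k 0 = m)) (List.range s.length) := by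
          refine List.countP_congr ?_
          intro k _
          simp [Function.comp]
        rw [hc, ← ih]
        rcases eq_or_ne y m with rfl | hym
        · simp
        · simp [List.getD_cons_zero, beq_iff_eq, hym, Ne.symm hym]
  have hgdmem : ∀ k, k < a.length → a.getD k 0 ∈ a := by
    intro k hk
    rw [List.getD_eq_getElem?_getD, List.getElem?_eq_getElem hk]
    exact List.getElem_mem hk
  by_cases hc : PySem.List.count a m = 1
  · rw [if_pos hc]
    rw [hcnt, hfilter] at hc
    obtain ⟨j0, hj0⟩ := List.length_eq_one_iff.mp hc
    have hj0mem : j0 ∈ (List.range a.length).filter (fun k => decide (a.getD k 0 = m)) := by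
      rw [hj0]; exact List.mem_singleton.mpr rfl
    have hj0lt : j0 < a.length := List.mem_range.mp (List.mem_of_mem_filter hj0mem)
    have hj0val : a.getD j0 0 = m := by
      have := List.of_mem_filter hj0mem
      simpa using this
    have huniq : ∀ k, k < a.length → a.getD k 0 = m → k = j0 := by
      intro k hk hkv
      have hkmem : k ∈ (List.range a.length).filter (fun k => decide (a.getD k 0 = m)) := by
        refine List.mem_filter.mpr ⟨List.mem_range.mpr hk, by simpa using hkv⟩
      rw [hj0] at hkmem
      exact List.mem_singleton.mp hkmem
    have hpt : ∀ j, j ∈ List.range a.length →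
        (Lb a j && Rb a j) = decide (j = j0) := by
      intro j hjmem
      have hj : j < a.length := List.mem_range.mp hjmem
      by_cases hjj : j = j0
      · subst hjj
        rw [decide_eq_true rfl]
        refine (both_iff a j hj).mpr ?_
        intro k hk hkj
        have hge : m ≤ a.getD k 0 := hisMin _ (hgdmem k hk)
        have hne : a.getD k 0 ≠ m := fun he => hkj (huniq k hk he)
        rw [hj0val]
        omega
      · rw [decide_eq_false hjj, Bool.eq_false_iff]
        intro hboth
        have hall := (both_iff a j hj).mp hboth
        have h1 : a.getD j0 0 > a.getD j 0 := hall j0 hj0lt (fun he => hjj he.symm)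
        have h2 : m ≤ a.getD j 0 := hisMin _ (hgdmem j hj)
        rw [hj0val] at h1
        omega
    rw [List.countP_congr (fun j hj => by rw [hpt j hj]), countP_range_single a.length j0 hj0lt]
    simp
  · rw [if_neg hc]
    have hpos : 1 ≤ a.count m := List.one_le_count_iff.mpr hmem
    rw [hcnt] at hc
    have h2 : 2 ≤ ((List.range a.length).filter (fun k => decide (a.getD k 0 = m))).length := by
      rw [hfilter] at hpos hc
      omega
    obtain ⟨k1, l1, hl1⟩ :=
      List.exists_cons_of_ne_nil (by intro he; rw [he] at h2; simp at h2 :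
        ((List.range a.length).filter (fun k => decide (a.getD k 0 = m))) ≠ [])
    obtain ⟨k2, l2, hl2⟩ :=
      List.exists_cons_of_ne_nil (by intro he; rw [he] at hl1; rw [hl1] at h2; simp at h2 :
        l1 ≠ [])
    have hnodup : ((List.range a.length).filter (fun k => decide (a.getD k 0 = m))).Nodup :=
      (List.nodup_range).filter _
    have hk12 : k1 ≠ k2 := by
      rw [hl1, hl2] at hnodup
      intro he
      subst he
      simp at hnodup
    have hk1p : k1 < a.length ∧ a.getD k1 0 = m := by
      have : k1 ∈ (List.range a.length).filter (fun k => decide (a.getD k 0 = m)) := by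
        rw [hl1]; exact List.mem_cons_self
      exact ⟨List.mem_range.mp (List.mem_of_mem_filter this), by simpa using List.of_mem_filter this⟩
    have hk2p : k2 < a.length ∧ a.getD k2 0 = m := by
      have : k2 ∈ (List.range a.length).filter (fun k => decide (a.getD k 0 = m)) := by
        rw [hl1, hl2]
        exact List.mem_cons_of_mem _ List.mem_cons_self
      exact ⟨List.mem_range.mp (List.mem_of_mem_filter this), by simpa using List.of_mem_filter this⟩
    have hzero : (List.range a.length).countP (fun j => Lb a j && Rb a j) = 0 := by
      refine List.countP_eq_zero.mpr ?_
      intro j hjmem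
      have hj : j < a.length := List.mem_range.mp hjmem
      intro hboth
      have hall := (both_iff a j hj).mp hboth
      have hge : m ≤ a.getD j 0 := hisMin _ (hgdmem j hj)
      rcases eq_or_ne k1 j with rfl | hne
      · have h5 := hall k2 hk2p.1 (fun he => hk12 he.symm)
        rw [hk2p.2] at h5
        omega
      · have h5 := hall k1 hk1p.1 hne
        rw [hk1p.2] at h5
        omega
    rw [hzero]
    simp

-- B's value as the same union count, by inclusion-exclusion
lemma solutionB_count (a : List Int) (h : a ≠ []) :
    solution_alt a = ((List.range a.length).countP (fun j => Lb a j || Rb a j) : Int) := by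
  have hM := extra_eq a h
  show recordsB a + recordsB a.reverse
      - (match PySem.List.min? a (fun x => x) with
         | some m => if PySem.List.count a m = 1 then (1 : Int) else 0
         | none => 0)
    = ((List.range a.length).countP (fun j => Lb a j || Rb a j) : Int)
  rw [records_count a h, records_reverse_count a h, hM]
  have hie := countP_or_and (List.range a.length) (Lb a) (Rb a)
  have hie' := congrArg (fun k : Nat => (k : Int)) hie
  push_cast at hie'
  omega

-- ===== VERDICT (by name: the statement is the Claim_ definition above) =====
theorem solution_spec : Claim_equal_solution := by
  intro a _ hpre
  unfold Spec_solution
  rw [solutionB_count a hpre]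
  rcases Nat.lt_or_ge a.length 2 with h | h
  · have h1 : a.length = 1 := by
      cases a with
      | nil => exact absurd rfl hpre
      | cons x t => simp at h ⊢; omega
    obtain ⟨x, rfl⟩ := List.length_eq_one_iff.mp h1
    rw [solution_one]
    simp [Lb]
  · rw [solutionA_count a h]
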